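-- pv_equiv track=rewrite | github.com/Cstannahill/code-evo | backend/app/services/architectural_analyzer.py | _detect_microservices_indicators
-- ===== SOURCE A (Python) =====
-- from typing import Dict, List, Any, Optional, Set, Tuple
--
-- def _detect_microservices_indicators(file_list: List[str]) -> bool:
--     """Detect microservices architecture indicators"""
--     indicators = [
--         any("docker" in f.lower() for f in file_list),
--         any("kubernetes" in f.lower() or "k8s" in f.lower() for f in file_list),
--         any("service" in f.lower() for f in file_list),
--         len([f for f in file_list if "api" in f.lower()]) > 2,
--         any("gateway" in f.lower() for f in file_list)
--     ]
--     return sum(indicators) >= 2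
-- ===== SOURCE B (Python) =====
-- from typing import List
--
-- def _detect_microservices_indicators(file_list: List[str]) -> bool:
--     """Detect microservices architecture indicators (single pass)."""
--     has_docker = has_k8s = has_service = has_gateway = False
--     api_count = 0
--     for f in file_list:
--         fl = f.lower()
--         if "docker" in fl:
--             has_docker = True
--         if "kubernetes" in fl or "k8s" in fl:
--             has_k8s = True
--         if "service" in fl:
--             has_service = True
--         if "gateway" in fl:
--             has_gateway = True
--         if "api" in fl:
--             api_count += 1
--     count = has_docker + has_k8s + has_service + (api_count > 2) + has_gateway
--     return count >= 2
-- ===== Notes on version B (the rewrite author's own statement) =====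
-- stated objective: faster
-- what changed: Replaces five separate scans of file_list (four any-generators and one filter) by a single traversal maintaining four boolean flags and an api counter combined after the loop, lowercasing each filename once instead of up to five times.
import Mathlib
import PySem

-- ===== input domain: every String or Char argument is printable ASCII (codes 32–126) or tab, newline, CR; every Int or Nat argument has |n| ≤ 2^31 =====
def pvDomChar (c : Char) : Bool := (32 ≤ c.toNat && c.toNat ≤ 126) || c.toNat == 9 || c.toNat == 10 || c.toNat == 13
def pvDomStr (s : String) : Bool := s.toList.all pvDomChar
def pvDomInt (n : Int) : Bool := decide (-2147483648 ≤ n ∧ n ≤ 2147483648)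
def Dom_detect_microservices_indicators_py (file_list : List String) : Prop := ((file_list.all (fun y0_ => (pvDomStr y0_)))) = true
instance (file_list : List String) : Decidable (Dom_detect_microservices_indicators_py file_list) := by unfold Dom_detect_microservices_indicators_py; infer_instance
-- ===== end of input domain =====

-- B replaces A's five separate scans by one pass maintaining flags and an api counter (objective: alternative).


-- ===== PORT A =====
def detect_microservices_indicators_py (file_list : List String) : Bool :=
  let indicators : List Bool :=
    [ file_list.any (fun f => PySem.Str.isIn "docker" (PySem.Str.lower f)),
      file_list.any (fun f => PySem.Str.isIn "kubernetes" (PySem.Str.lower f) ||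
                              PySem.Str.isIn "k8s" (PySem.Str.lower f)),
      file_list.any (fun f => PySem.Str.isIn "service" (PySem.Str.lower f)),
      decide (((file_list.filter (fun f => PySem.Str.isIn "api" (PySem.Str.lower f))).length : Int) > 2),
      file_list.any (fun f => PySem.Str.isIn "gateway" (PySem.Str.lower f)) ]
  decide (indicators.foldl (fun acc b => acc + (if b then (1 : Int) else 0)) 0 ≥ 2)

-- ===== PORT B =====
def pvAltStep (st : Bool × Bool × Bool × Bool × Int) (f : String) :
    Bool × Bool × Bool × Bool × Int :=
  let fl := PySem.Str.lower f
  ( st.1 || PySem.Str.isIn "docker" fl,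
    st.2.1 || PySem.Str.isIn "kubernetes" fl || PySem.Str.isIn "k8s" fl,
    st.2.2.1 || PySem.Str.isIn "service" fl,
    st.2.2.2.1 || PySem.Str.isIn "gateway" fl,
    st.2.2.2.2 + (if PySem.Str.isIn "api" fl then (1 : Int) else 0) )

def detect_microservices_indicators_py_alt (file_list : List String) : Bool :=
  let st := file_list.foldl pvAltStep (false, false, false, false, (0 : Int))
  let count : Int :=
    (if st.1 then 1 else 0) + (if st.2.1 then 1 else 0) + (if st.2.2.1 then 1 else 0) +
    (if st.2.2.2.2 > 2 then 1 else 0) + (if st.2.2.2.1 then 1 else 0)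
  decide (count ≥ 2)

-- ===== PRECONDITION & SPEC =====
def Spec_detect_microservices_indicators_py (file_list : List String) (out : Bool) : Prop := out = detect_microservices_indicators_py_alt file_list
instance (file_list : List String) (out : Bool) : Decidable (Spec_detect_microservices_indicators_py file_list out) := by unfold Spec_detect_microservices_indicators_py; infer_instance

-- ===== CLAIM (what is proved, stated in full; the proofs are below) =====
def Claim_equal_detect_microservices_indicators_py : Prop := ∀ (file_list : List String), Dom_detect_microservices_indicators_py file_list → Spec_detect_microservices_indicators_py file_list (detect_microservices_indicators_py file_list)

-- ===== LEMMAS AND PROOFS =====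

-- the single-pass fold computes the five per-predicate aggregates
theorem pvAltStep_foldl (l : List String) (a b c d : Bool) (n : Int) :
    l.foldl pvAltStep (a, b, c, d, n) =
      ( a || l.any (fun f => PySem.Str.isIn "docker" (PySem.Str.lower f)),
        b || l.any (fun f => PySem.Str.isIn "kubernetes" (PySem.Str.lower f) ||
                             PySem.Str.isIn "k8s" (PySem.Str.lower f)),
        c || l.any (fun f => PySem.Str.isIn "service" (PySem.Str.lower f)),
        d || l.any (fun f => PySem.Str.isIn "gateway" (PySem.Str.lower f)),
        n + (l.countP (fun f => PySem.Str.isIn "api" (PySem.Str.lower f)) : Int) ) := by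
  induction l generalizing a b c d n with
  | nil => simp
  | cons x xs ih =>
      simp only [List.foldl_cons, pvAltStep, ih, List.any_cons, List.countP_cons,
        Prod.mk.injEq, Bool.or_assoc, true_and]
      split_ifs <;> push_cast <;> ring

-- ===== VERDICT (by name: the statement is the Claim_ definition above) =====
theorem detect_microservices_indicators_py_spec : Claim_equal_detect_microservices_indicators_py := by
  intro file_list _
  show _ = _
  simp only [detect_microservices_indicators_py, detect_microservices_indicators_py_alt,
    pvAltStep_foldl, List.foldl_cons, List.foldl_nil, Bool.false_or,
    List.countP_eq_length_filter, decide_eq_true_eq, zero_add]
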